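-- pv_equiv track=rewrite | github.com/gregoryAcosta12/Proyectos-de-python | juego-car-park/car_park_puzzle.py | find_car_positions
-- ===== SOURCE A (Python) =====
-- def find_car_positions(board):
--     car_positions = {}
--     for i, row in enumerate(board):
--         for j, cell in enumerate(row):
--             if cell.isalpha() and cell != 'M':  # Encontrar todas las letras que representan autos
--                 if cell not in car_positions:
--                     car_positions[cell] = []
--                 car_positions[cell].append([i, j])
--     return car_positions
-- ===== SOURCE B (Python) =====
-- def find_car_positions(board):
--     # Collect-then-group: one flat pass gathering (cell, [i, j]) triples,
--     # then one grouping pass per distinct car letter (first-occurrence key order).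
--     cars = [(cell, [i, j])
--             for i, row in enumerate(board)
--             for j, cell in enumerate(row)
--             if cell.isalpha() and cell != 'M']
--     keys = dict.fromkeys(c for c, _ in cars)
--     return {k: [pos for c, pos in cars if c == k] for k in keys}
-- ===== Notes on version B (the rewrite author's own statement) =====
-- stated objective: alternative
-- what changed: Replaces A's incremental dict accumulation inside nested loops with a collect-then-group pipeline: one flat comprehension of (cell, position) triples, an ordered key dedup via dict.fromkeys, then one grouping pass per distinct car letter.
import Mathlib
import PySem

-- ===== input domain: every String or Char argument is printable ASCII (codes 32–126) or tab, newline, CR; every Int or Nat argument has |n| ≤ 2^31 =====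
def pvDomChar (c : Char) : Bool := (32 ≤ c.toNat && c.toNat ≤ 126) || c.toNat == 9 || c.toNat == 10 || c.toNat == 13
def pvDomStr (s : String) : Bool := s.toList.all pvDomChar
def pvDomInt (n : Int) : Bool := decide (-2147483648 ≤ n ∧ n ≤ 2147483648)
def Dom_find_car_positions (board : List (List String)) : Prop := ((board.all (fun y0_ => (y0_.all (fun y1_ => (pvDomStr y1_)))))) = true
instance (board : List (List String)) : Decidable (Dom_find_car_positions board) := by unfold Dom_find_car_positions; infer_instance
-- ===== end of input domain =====

-- B replaces A's incremental dict accumulation with a collect-then-group pipeline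
-- (one flat pass of (cell, pos) triples, then one grouping pass per distinct letter); objective: alternative.


-- ===== PORT A =====
-- incremental dict accumulation over the two nested enumerate loops; the dict is returned as its items list
def find_car_positions (board : List (List String)) : List (String × List (List Int)) :=
  ((PySem.List.enumerate board).foldl (fun d p =>
    (PySem.List.enumerate p.2).foldl (fun d q =>
      if PySem.Str.strIsalpha q.2 && (q.2 != "M") then
        let d := if d.contains q.2 then d else d.insert q.2 []
        d.modify q.2 [] (· ++ [[p.1, q.1]])
      else d) d) (PySem.Dict.empty : PySem.Dict String (List (List Int)))).items

-- ===== PORT B =====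
-- phase 1: flat list of (cell, [i, j]) triples, row-major
def pvCars (board : List (List String)) : List (String × List Int) :=
  (PySem.List.enumerate board).flatMap (fun p =>
    (PySem.List.enumerate p.2).filterMap (fun q =>
      if PySem.Str.strIsalpha q.2 && (q.2 != "M") then some (q.2, [p.1, q.1]) else none))

-- phase 2: ordered dedup of the keys (dict.fromkeys), then one grouping pass per key
def find_car_positions_alt (board : List (List String)) : List (String × List (List Int)) :=
  let cars := pvCars board
  let keys := PySem.List.dedup (cars.map (·.1))
  keys.map (fun k => (k, (cars.filter (fun c => c.1 == k)).map (·.2)))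

-- ===== PRECONDITION & SPEC =====
def Spec_find_car_positions (board : List (List String)) (out : List (String × List (List Int))) : Prop := out = find_car_positions_alt board
instance (board : List (List String)) (out : List (String × List (List Int))) : Decidable (Spec_find_car_positions board out) := by unfold Spec_find_car_positions; infer_instance

-- ===== CLAIM (what is proved, stated in full; the proofs are below) =====
def Claim_equal_find_car_positions : Prop := ∀ (board : List (List String)), Dom_find_car_positions board → Spec_find_car_positions board (find_car_positions board)

-- ===== LEMMAS AND PROOFS =====

-- A's "create empty list if absent, then append" step is exactly modify-with-default-[]
theorem pv_step_eq (d : PySem.Dict String (List (List Int))) (cell : String) (v : List Int) :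
    (if d.contains cell then d else d.insert cell []).modify cell [] (· ++ [v])
      = d.modify cell [] (· ++ [v]) := by
  by_cases h : d.contains cell
  · simp [h]
  · have h' : d.contains cell = false := by simpa using h
    simp only [h', Bool.false_eq_true, if_false, PySem.Dict.modify,
      PySem.Dict.getD_insert_self, PySem.Dict.insert_insert_self,
      PySem.Dict.getD_of_not_contains d _ h']

-- A's nested loops equal a single fold of the modify step over B's flat triple list
theorem pv_fold_flat (board : List (List String)) :
    find_car_positions board
      = ((pvCars board).foldl (fun d p => d.modify p.1 [] (· ++ [p.2]))
          (PySem.Dict.empty : PySem.Dict String (List (List Int)))).items := by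
  unfold find_car_positions pvCars
  rw [List.foldl_flatMap]
  congr 1
  apply List.foldl_ext
  intro d p _
  rw [List.foldl_filterMap]
  apply List.foldl_ext
  intro d' q _
  by_cases h : (PySem.Str.strIsalpha q.2 && (q.2 != "M")) = true
  · simp only [h, if_true, pv_step_eq]
  · simp only [eq_false_of_ne_true h, Bool.false_eq_true, if_false]

theorem find_car_positions_spec' (board : List (List String)) :
    find_car_positions board = find_car_positions_alt board := by
  rw [pv_fold_flat]
  unfold find_car_positions_alt
  rw [PySem.Dict.items_eq_map_keys _
    (PySem.Dict.nodup_keys_foldl_modify_key (pvCars board) (·.1) [] (fun _ p v => v ++ [p.2])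
      PySem.Dict.empty (by simp [PySem.Dict.keys_empty])) []]
  rw [PySem.Dict.keys_foldl_modify_key (pvCars board) (·.1) [] (fun _ p v => v ++ [p.2])]
  simp only [PySem.Dict.keys_empty, PySem.Set.update_nil_left, PySem.List.dedup]
  apply List.map_congr_left
  intro k _
  rw [PySem.Dict.getD_foldl_modify_append, PySem.Dict.getD_empty]
  simp

-- ===== VERDICT (by name: the statement is the Claim_ definition above) =====
theorem find_car_positions_spec : Claim_equal_find_car_positions := by
  intro board _
  exact find_car_positions_spec' board
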